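-- pv_equiv track=rewrite | github.com/chuajunyu/adventofcode | 2021/day09.py | solve
-- ===== SOURCE A (Python) =====
-- from math import prod
--
-- def find_basin(input, curr_point, found):
--     """ DFS search to find all points in a basin """
--     x, y = curr_point
--     found.add(curr_point)
--
--     to_search = [(x - 1, y), (x + 1, y), (x, y - 1), (x, y + 1)]
--     for point in to_search:
--         try:
--             x , y = point
--             assert x >= 0 and y >= 0, "No indexing from the back"
--             value = input[y][x]
--             if value != 9 and point not in found:
--                 found |= find_basin(input, point, found)
--         except (IndexError, AssertionError):
--             continue
--     return found
--
-- def solve(input):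
--     """
--     Finds the low points and append them to a list
--     Run a DFS search on low points to return a set of points that are in a basin
--     Returns sum of low points + 1 and product of top 3 basins
--     """
--     low_points = []
--     basin_sizes = []
--     for y in range(len(input)):
--         for x in range(len(input[0])):
--             low = True
--             num = input[y][x]
--             to_search = [(x - 1, y), (x + 1, y), (x, y - 1), (x, y + 1)]
--
--             for point in to_search:
--                 try:
--                     new_x , new_y = point
--                     assert new_x >= 0 and new_y >= 0, "No indexing from the back"
--                     value = input[new_y][new_x]
--                     if not num < value:
--                         low = False
--                         break
--                 except (IndexError, AssertionError):
--                     continue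
--
--             if low:  # Current num is a low point
--                 low_points.append(num)
--                 size = len(find_basin(input, (x, y), set()))
--                 basin_sizes.append(size)
--
--     basin_sizes.sort(reverse=True)
--     product = prod(basin_sizes[:3])
--     return sum([i + 1 for i in low_points]), product
-- ===== SOURCE B (Python) =====
-- from math import prod
--
-- def solve(input):
--     if not input:
--         return (0, 1)
--     h, w = len(input), len(input[0])
--
--     def value(y, x):
--         if 0 <= y < h and 0 <= x < len(input[y]):
--             return input[y][x]
--         return None
--
--     def basin_size(y, x):
--         visited = {(x, y)}
--         stack = [(x, y)]
--         while stack: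
--             px, py = stack.pop()
--             for nx, ny in ((px - 1, py), (px + 1, py), (px, py - 1), (px, py + 1)):
--                 if 0 <= ny < h and 0 <= nx < len(input[ny]):
--                     v = input[ny][nx]
--                     if v != 9 and (nx, ny) not in visited:
--                         visited.add((nx, ny))
--                         stack.append((nx, ny))
--         return len(visited)
--
--     lows = []
--     sizes = []
--     for y in range(h):
--         for x in range(w):
--             num = input[y][x]
--             neigh = (value(y, x - 1), value(y, x + 1), value(y - 1, x), value(y + 1, x))
--             if all(v is None or num < v for v in neigh):
--                 lows.append(num)
--                 sizes.append(basin_size(y, x))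
--
--     sizes.sort(reverse=True)
--     return sum(v + 1 for v in lows), prod(sizes[:3])
-- ===== Notes on version B (the rewrite author's own statement) =====
-- stated objective: idiomatic
-- what changed: Replaces A's recursive exception-driven DFS (try/except IndexError, assert, set mutated through recursion) by an iterative stack-based flood fill over a bounds-checked cell lookup, and the break-loop low-point test by an all() over the four neighbour values.
import Mathlib
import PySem

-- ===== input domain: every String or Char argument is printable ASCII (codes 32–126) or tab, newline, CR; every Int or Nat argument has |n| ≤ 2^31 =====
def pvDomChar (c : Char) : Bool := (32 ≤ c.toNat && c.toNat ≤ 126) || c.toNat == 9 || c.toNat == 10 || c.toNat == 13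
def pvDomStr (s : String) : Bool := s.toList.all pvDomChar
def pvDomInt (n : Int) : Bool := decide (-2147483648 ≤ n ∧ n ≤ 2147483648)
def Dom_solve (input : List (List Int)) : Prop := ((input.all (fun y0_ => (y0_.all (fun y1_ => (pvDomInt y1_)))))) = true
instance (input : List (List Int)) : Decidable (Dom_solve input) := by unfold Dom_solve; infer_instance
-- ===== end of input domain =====

-- B replaces A's recursive exception-guarded DFS by an iterative stack flood fill with
-- explicit bounds checks (objective: idiomatic/alternative decomposition, same result).

-- ===== PORT A =====
-- the four neighbour points [(x-1,y),(x+1,y),(x,y-1),(x,y+1)] (same literal list in both Pythons)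
def nbrs (p : Int × Int) : List (Int × Int) := [(p.1 - 1, p.2), (p.1 + 1, p.2), (p.1, p.2 - 1), (p.1, p.2 + 1)]

-- A's `assert x >= 0 and y >= 0` + `input[y][x]` under try/except: none = AssertionError/IndexError
def tryValA (g : List (List Int)) (q : Int × Int) : Option Int :=
  if 0 ≤ q.1 ∧ 0 ≤ q.2 then
    (PySem.List.pyGet? g q.2).bind (fun row => PySem.List.pyGet? row q.1)
  else none

def cellCount (g : List (List Int)) : Nat := (g.map List.length).sum

-- A's recursive find_basin; the fuel argument only makes the recursion structural
-- (cellCount g + 1 is always enough: each nested call adds a fresh grid cell to `found`)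
def findBasin (g : List (List Int)) : Nat → (Int × Int) → PySem.Set (Int × Int) → PySem.Set (Int × Int)
  | 0, _, found => found
  | fuel+1, p, found =>
    (nbrs p).foldl (fun acc q =>
      match tryValA g q with
      | none => acc
      | some v => if v ≠ 9 ∧ q ∉ acc then findBasin g fuel q acc else acc)
      (PySem.Set.add found p)

-- A's inner low-point loop with its early `break`
def lowLoopA (g : List (List Int)) (num : Int) : List (Int × Int) → Bool
  | [] => true
  | q :: rest =>
    match tryValA g q with
    | none => lowLoopA g num rest
    | some v => if ¬ (num < v) then false else lowLoopA g num rest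

def solve (input : List (List Int)) : Int × Int :=
  let st := (PySem.List.pyRange 0 (input.length : Int)).foldl (fun st y =>
    (PySem.List.pyRange 0 ((input.headD []).length : Int)).foldl (fun st x =>
      let num := PySem.List.pyGetD (PySem.List.pyGetD input y []) x 0
      if lowLoopA input num (nbrs (x, y)) then
        (st.1 ++ [num],
         st.2 ++ [PySem.Set.len (findBasin input (cellCount input + 1) (x, y) PySem.Set.empty)])
      else st) st)
    (([], []) : List Int × List Int)
  let sizes := PySem.List.sorted st.2 (fun s => s) true
  ((st.1.map (fun i => i + 1)).sum,
   (PySem.List.slice sizes none (some 3)).foldl (fun a b => a * b) 1)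

-- ===== PORT B =====
-- B's bounds-checked cell lookup: None exactly when (y, x) is outside the grid
def valB (g : List (List Int)) (y x : Int) : Option Int :=
  if 0 ≤ y ∧ y < (g.length : Int) then
    let row := PySem.List.pyGetD g y []
    if 0 ≤ x ∧ x < (row.length : Int) then some (PySem.List.pyGetD row x 0) else none
  else none

-- the body of B's `while stack` loop for one neighbour: the inlined bounds check +
-- lookup is valB (stack kept top-at-head: Python appends to and pops from the END of
-- the list; cons/head is the same LIFO discipline)
def floodStep (g : List (List Int)) (st : List (Int × Int) × PySem.Set (Int × Int)) (q : Int × Int) :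
    List (Int × Int) × PySem.Set (Int × Int) :=
  match valB g q.2 q.1 with
  | some v => if v ≠ 9 ∧ q ∉ st.2 then (q :: st.1, PySem.Set.add st.2 q) else st
  | none => st

-- B's iterative flood fill (fuel = cellCount g + 1 only makes the loop structural:
-- every push adds a fresh grid cell to `visited`)
def flood (g : List (List Int)) : Nat → List (Int × Int) → PySem.Set (Int × Int) → PySem.Set (Int × Int)
  | _, [], visited => visited
  | 0, _ :: _, visited => visited
  | fuel+1, p :: rest, visited =>
    let st := (nbrs p).foldl (floodStep g) (rest, visited)
    flood g fuel st.1 st.2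

def basinSizeB (g : List (List Int)) (y x : Int) : Int :=
  PySem.Set.len (flood g (cellCount g + 1) [(x, y)] (PySem.Set.add PySem.Set.empty (x, y)))

-- B's `all(v is None or num < v for v in neigh)`
def isLowB (g : List (List Int)) (num x y : Int) : Bool :=
  [valB g y (x - 1), valB g y (x + 1), valB g (y - 1) x, valB g (y + 1) x].all (fun v =>
    match v with
    | none => true
    | some w => decide (num < w))

def solve_alt (input : List (List Int)) : Int × Int :=
  match input with
  | [] => (0, 1)
  | r0 :: _ =>
    let st := (PySem.List.pyRange 0 (input.length : Int)).foldl (fun st y =>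
      (PySem.List.pyRange 0 (r0.length : Int)).foldl (fun st x =>
        let num := PySem.List.pyGetD (PySem.List.pyGetD input y []) x 0
        if isLowB input num x y then (st.1 ++ [num], st.2 ++ [basinSizeB input y x]) else st) st)
      (([], []) : List Int × List Int)
    let top3 := PySem.List.slice (PySem.List.sorted st.2 (fun s => s) true) none (some 3)
    ((st.1.map (fun v => v + 1)).sum, top3.foldl (fun a b => a * b) 1)

-- ===== PRECONDITION & SPEC =====
-- Pre_ excludes exactly the ragged grids on which A raises an uncaught IndexError:
-- a row shorter than row 0 is reached by A's unguarded `num = input[y][x]`.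
def Pre_solve (input : List (List Int)) : Prop :=
  ∀ row ∈ input, (input.headD []).length ≤ row.length
instance (input : List (List Int)) : Decidable (Pre_solve input) := by unfold Pre_solve; infer_instance

def pvWitness_solve : List (List Int) := [[1, 9], [9, 8]]

def Spec_solve (input : List (List Int)) (out : Int × Int) : Prop := out = solve_alt input
instance (input : List (List Int)) (out : Int × Int) : Decidable (Spec_solve input out) := by unfold Spec_solve; infer_instance

-- ===== CLAIM (what is proved, stated in full; the proofs are below) =====
def Claim_equal_solve : Prop := ∀ (input : List (List Int)), Dom_solve input → Pre_solve input → Spec_solve input (solve input)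

-- ===== LEMMAS AND PROOFS =====

-- the valid grid cells (x, y), as a predicate and as a Finset
def Valid (g : List (List Int)) (p : Int × Int) : Prop :=
  0 ≤ p.1 ∧ 0 ≤ p.2 ∧ p.2 < (g.length : Int) ∧ p.1 < ((g.getD p.2.toNat []).length : Int)

def Vg (g : List (List Int)) : Finset (Int × Int) :=
  (Finset.range g.length).biUnion (fun y =>
    (Finset.range ((g.getD y []).length)).image (fun x : Nat => ((x : Int), (y : Int))))

-- the basin adjacency: q is a neighbour of p holding a value ≠ 9
def Edge (g : List (List Int)) (p q : Int × Int) : Prop :=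
  q ∈ nbrs p ∧ ∃ v, valB g q.2 q.1 = some v ∧ v ≠ 9

def Reach (g : List (List Int)) : (Int × Int) → (Int × Int) → Prop :=
  Relation.ReflTransGen (Edge g)

theorem mem_Vg (g : List (List Int)) (p : Int × Int) : p ∈ Vg g ↔ Valid g p := by
  obtain ⟨px, py⟩ := p
  simp only [Vg, Valid, Finset.mem_biUnion, Finset.mem_image, Finset.mem_range]
  constructor
  · rintro ⟨y, hy, x, hx, h⟩
    obtain ⟨rfl, rfl⟩ : (x : Int) = px ∧ (y : Int) = py := by
      simpa [Prod.ext_iff] using h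
    refine ⟨by positivity, by positivity, by exact_mod_cast hy, ?_⟩
    simp only [Int.toNat_natCast]
    exact_mod_cast hx
  · rintro ⟨h1, h2, h3, h4⟩
    refine ⟨py.toNat, by omega, px.toNat, ?_, by simp [h1, h2]⟩
    omega

theorem getD_row (g : List (List Int)) (n : Nat) (h : n < g.length) : g.getD n [] = g[n] := by
  simp [List.getD_eq_getElem?_getD, List.getElem?_eq_getElem h]

theorem valB_getD (g : List (List Int)) (y : Int) (h1 : 0 ≤ y) (h2 : y < (g.length : Int)) :
    PySem.List.pyGetD g y [] = g[y.toNat]'(by omega) := PySem.List.pyGetD_eq_getElem g [] h1 h2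

theorem tryValA_eq (g : List (List Int)) (q : Int × Int) : tryValA g q = valB g q.2 q.1 := by
  obtain ⟨x, y⟩ := q
  simp only [tryValA, valB]
  by_cases hy0 : 0 ≤ y
  · by_cases hx0 : 0 ≤ x
    · rw [if_pos ⟨hx0, hy0⟩, PySem.List.pyGet?_of_nonneg _ hy0]
      by_cases hyl : y < (g.length : Int)
      · rw [if_pos ⟨hy0, hyl⟩, List.getElem?_eq_getElem (show y.toNat < g.length by omega),
            Option.bind_some, PySem.List.pyGet?_of_nonneg _ hx0]
        simp only [valB_getD g y hy0 hyl]
        by_cases hxl : x < ((g[y.toNat]'(by omega) : List Int).length : Int)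
        · rw [if_pos ⟨hx0, hxl⟩, List.getElem?_eq_getElem (show x.toNat < _ by omega),
              PySem.List.pyGetD_eq_getElem _ 0 hx0 hxl]
        · rw [if_neg (by omega), List.getElem?_eq_none (by omega)]
      · rw [if_neg (by omega), List.getElem?_eq_none (by omega), Option.bind_none]
    · rw [if_neg (by omega)]
      by_cases hyl : 0 ≤ y ∧ y < (g.length : Int)
      · rw [if_pos hyl, if_neg (by omega)]
      · rw [if_neg hyl]
  · rw [if_neg (by omega), if_neg (by omega)]

theorem valB_some_valid (g : List (List Int)) {y x v : Int} (h : valB g y x = some v) : Valid g (x, y) := by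
  simp only [valB] at h
  split_ifs at h with h1 h2
  refine ⟨h2.1, h1.1, h1.2, ?_⟩
  have := h2.2
  rw [valB_getD g y h1.1 h1.2] at this
  rw [getD_row g y.toNat (by omega)]
  exact this

theorem card_Vg_le (g : List (List Int)) : (Vg g).card ≤ cellCount g := by
  refine le_trans (Finset.card_biUnion_le) ?_
  refine le_trans (Finset.sum_le_sum (fun y _ => Finset.card_image_le)) ?_
  simp only [Finset.card_range, cellCount]
  induction g with
  | nil => simp
  | cons r t ih =>
    simp only [List.length_cons]
    rw [Finset.sum_range_succ']
    simp only [List.getD_cons_succ, List.getD_cons_zero, List.map_cons, List.sum_cons]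
    omega

-- ---------- A side ----------

-- the loop body of find_basin, named for the proofs
def fbStep (g : List (List Int)) (fuel : Nat) (acc : PySem.Set (Int × Int)) (q : Int × Int) :
    PySem.Set (Int × Int) :=
  match tryValA g q with
  | none => acc
  | some v => if v ≠ 9 ∧ q ∉ acc then findBasin g fuel q acc else acc

theorem findBasin_succ (g : List (List Int)) (fuel : Nat) (p : Int × Int) (found : PySem.Set (Int × Int)) :
    findBasin g (fuel+1) p found = (nbrs p).foldl (fbStep g fuel) (PySem.Set.add found p) := rfl

theorem findBasin_mono (g : List (List Int)) :
    ∀ fuel p found, ∀ a ∈ found, a ∈ findBasin g fuel p found := by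
  intro fuel
  induction fuel with
  | zero => intro p found a ha; exact ha
  | succ fuel ih =>
    intro p found a ha
    rw [findBasin_succ]
    refine List.foldlRecOn (nbrs p) _ (motive := fun s => a ∈ s) ?_ ?_
    · exact (PySem.Set.mem_add _ _ _).mpr (Or.inl ha)
    · intro b hb q _
      simp only [fbStep]
      rcases htv : tryValA g q with _ | v
      · exact hb
      · dsimp only
        split_ifs with hg
        · exact ih q b a hb
        · exact hb

theorem findBasin_nodup (g : List (List Int)) :
    ∀ fuel p found, List.Nodup found → List.Nodup (findBasin g fuel p found) := by
  intro fuel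
  induction fuel with
  | zero => intro p found h; exact h
  | succ fuel ih =>
    intro p found h
    rw [findBasin_succ]
    refine List.foldlRecOn (nbrs p) _ (motive := fun s => List.Nodup s) ?_ ?_
    · exact PySem.Set.nodup_add _ _ h
    · intro b hb q _
      simp only [fbStep]
      rcases htv : tryValA g q with _ | v
      · exact hb
      · dsimp only
        split_ifs with hg
        · exact ih q b hb
        · exact hb

theorem findBasin_sound (g : List (List Int)) :
    ∀ fuel p found, ∀ a ∈ findBasin g fuel p found, a ∈ found ∨ Reach g p a := by
  intro fuel
  induction fuel with
  | zero => intro p found a ha; exact Or.inl ha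
  | succ fuel ih =>
    intro p found
    rw [findBasin_succ]
    refine List.foldlRecOn (nbrs p) _ (motive := fun s => ∀ a ∈ s, a ∈ found ∨ Reach g p a) ?_ ?_
    · intro a ha
      rcases (PySem.Set.mem_add _ _ _).mp ha with h | rfl
      · exact Or.inl h
      · exact Or.inr Relation.ReflTransGen.refl
    · intro b hb q hq
      simp only [fbStep]
      rcases htv : tryValA g q with _ | v
      · exact hb
      · dsimp only
        split_ifs with hg
        · intro a ha
          rcases ih q b a ha with h | hr
          · exact hb a h
          · have hedge : Edge g p q := ⟨hq, v, by rw [← tryValA_eq]; exact htv, hg.1⟩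
            have hpq : Reach g p q := Relation.ReflTransGen.single hedge
            exact Or.inr (hpq.trans hr)
        · exact hb

theorem findBasin_closed (g : List (List Int)) :
    ∀ fuel p found, Valid g p → p ∉ found → ((Vg g) \ found.toFinset).card ≤ fuel →
      (p ∈ findBasin g fuel p found) ∧
      (∀ a ∈ findBasin g fuel p found, a ∉ found →
        ∀ q, Edge g a q → q ∈ findBasin g fuel p found) := by
  intro fuel
  induction fuel using Nat.strong_induction_on with
  | _ fuel ih =>
  intro p found hvp hpf hcard
  have hpVg : p ∈ Vg g := (mem_Vg g p).mpr hvp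
  have hpos : 0 < ((Vg g) \ found.toFinset).card :=
    Finset.card_pos.mpr ⟨p, Finset.mem_sdiff.mpr ⟨hpVg, by simpa using hpf⟩⟩
  obtain ⟨fu, rfl⟩ : ∃ fu, fuel = fu + 1 := ⟨fuel - 1, by omega⟩
  rw [findBasin_succ]
  -- inner fold invariant over any suffix of the neighbour list
  have inner : ∀ (l : List (Int × Int)) (acc : PySem.Set (Int × Int)),
      (∀ a ∈ PySem.Set.add found p, a ∈ acc) →
      (∀ a ∈ acc, a ∉ found → a = p ∨ ∀ q, Edge g a q → q ∈ acc) →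
      (∀ a ∈ acc, a ∈ List.foldl (fbStep g fu) acc l) ∧
      (∀ a ∈ List.foldl (fbStep g fu) acc l, a ∉ found →
        a = p ∨ ∀ q, Edge g a q → q ∈ List.foldl (fbStep g fu) acc l) ∧
      (∀ q ∈ l, Edge g p q → q ∈ List.foldl (fbStep g fu) acc l) := by
    intro l
    induction l with
    | nil =>
      intro acc h1 h2
      exact ⟨fun a ha => ha, fun a ha hf => h2 a ha hf, by simp⟩
    | cons q l ihl =>
      intro acc h1 h2
      simp only [List.foldl_cons]
      rcases htv : tryValA g q with _ | v
      · have hstep : fbStep g fu acc q = acc := by simp [fbStep, htv]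
        rw [hstep]
        obtain ⟨c0, c2, c3⟩ := ihl acc h1 h2
        refine ⟨c0, c2, ?_⟩
        intro q' hq' he
        rcases List.mem_cons.mp hq' with rfl | hmem
        · obtain ⟨_, v, hv, _⟩ := he
          rw [← tryValA_eq, htv] at hv
          exact absurd hv (by simp)
        · exact c3 q' hmem he
      · by_cases hg : v ≠ 9 ∧ q ∉ acc
        · have hstep : fbStep g fu acc q = findBasin g fu q acc := by
            simp only [fbStep, htv]; rw [if_pos hg]
          rw [hstep]
          have hvB : valB g q.2 q.1 = some v := by rw [← tryValA_eq]; exact htv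
          have hvq : Valid g q := by
            have := valB_some_valid g hvB
            simpa using this
          have hcard' : ((Vg g) \ acc.toFinset).card ≤ fu := by
            have hsub : (Vg g) \ acc.toFinset ⊆ ((Vg g) \ found.toFinset).erase p := by
              intro a ha
              rw [Finset.mem_sdiff] at ha
              rw [Finset.mem_erase, Finset.mem_sdiff]
              have hpacc : p ∈ acc := h1 p ((PySem.Set.mem_add _ _ _).mpr (Or.inr rfl))
              refine ⟨?_, ha.1, ?_⟩
              · rintro rfl; exact ha.2 (by simpa using hpacc)
              · intro hfd
                exact ha.2 (by simpa using h1 a ((PySem.Set.mem_add _ _ _).mpr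
                  (Or.inl (by simpa using hfd))))
            have := Finset.card_le_card hsub
            rw [Finset.card_erase_of_mem (Finset.mem_sdiff.mpr ⟨hpVg, by simpa using hpf⟩)] at this
            omega
          obtain ⟨hqin, hcl⟩ := ih fu (by omega) q acc hvq hg.2 hcard'
          have hmono : ∀ a ∈ acc, a ∈ findBasin g fu q acc := findBasin_mono g fu q acc
          have h1' : ∀ a ∈ PySem.Set.add found p, a ∈ findBasin g fu q acc :=
            fun a ha => hmono a (h1 a ha)
          have h2' : ∀ a ∈ findBasin g fu q acc, a ∉ found →
              a = p ∨ ∀ q2, Edge g a q2 → q2 ∈ findBasin g fu q acc := by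
            intro a ha hf
            by_cases hacc : a ∈ acc
            · rcases h2 a hacc hf with rfl | hcls
              · exact Or.inl rfl
              · exact Or.inr (fun q2 he2 => hmono _ (hcls q2 he2))
            · exact Or.inr (fun q2 he2 => hcl a ha hacc q2 he2)
          obtain ⟨c0, c2, c3⟩ := ihl _ h1' h2'
          refine ⟨fun a ha => c0 _ (hmono a ha), c2, ?_⟩
          intro q' hq' he
          rcases List.mem_cons.mp hq' with rfl | hmem
          · exact c0 _ hqin
          · exact c3 q' hmem he
        · have hstep : fbStep g fu acc q = acc := by
            simp only [fbStep, htv]; rw [if_neg hg]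
          rw [hstep]
          obtain ⟨c0, c2, c3⟩ := ihl acc h1 h2
          refine ⟨c0, c2, ?_⟩
          intro q' hq' he
          rcases List.mem_cons.mp hq' with rfl | hmem
          · obtain ⟨_, v', hv', hv9⟩ := he
            rw [← tryValA_eq, htv] at hv'
            have hvv : v' = v := by injection hv'.symm
            subst hvv
            have hqacc : q' ∈ acc := by
              by_contra hqa
              exact hg ⟨hv9, hqa⟩
            exact c0 q' hqacc
          · exact c3 q' hmem he
  obtain ⟨c0, c2, c3⟩ := inner (nbrs p) (PySem.Set.add found p) (fun a ha => ha)
    (fun a ha hf => by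
      rcases (PySem.Set.mem_add _ _ _).mp ha with h | rfl
      · exact absurd h hf
      · exact Or.inl rfl)
  refine ⟨c0 p ((PySem.Set.mem_add _ _ _).mpr (Or.inr rfl)), ?_⟩
  intro a ha hf q he
  rcases c2 a ha hf with rfl | hcls
  · exact c3 q he.1 he
  · exact hcls q he

theorem findBasin_iff (g : List (List Int)) (s : Int × Int) (hs : Valid g s) (a : Int × Int) :
    a ∈ findBasin g (cellCount g + 1) s PySem.Set.empty ↔ Reach g s a := by
  constructor
  · intro h
    rcases findBasin_sound g _ s PySem.Set.empty a h with h0 | hr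
    · exact absurd h0 (List.not_mem_nil)
    · exact hr
  · intro hr
    have hcard : ((Vg g) \ (PySem.Set.empty : PySem.Set (Int × Int)).toFinset).card ≤ cellCount g + 1 := by
      have : ((PySem.Set.empty : PySem.Set (Int × Int)).toFinset) = ∅ := rfl
      rw [this, Finset.sdiff_empty]
      have := card_Vg_le g
      omega
    obtain ⟨hm, hcl⟩ := findBasin_closed g (cellCount g + 1) s PySem.Set.empty hs (List.not_mem_nil) hcard
    unfold Reach at hr
    induction hr with
    | refl => exact hm
    | tail hab hbc ihh => exact hcl _ ihh (List.not_mem_nil) _ hbc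

-- ---------- B side ----------

theorem flood_succ (g : List (List Int)) (fuel : Nat) (p : Int × Int) (rest : List (Int × Int))
    (visited : PySem.Set (Int × Int)) :
    flood g (fuel+1) (p :: rest) visited =
      flood g fuel ((nbrs p).foldl (floodStep g) (rest, visited)).1
        ((nbrs p).foldl (floodStep g) (rest, visited)).2 := rfl

theorem flood_mono (g : List (List Int)) :
    ∀ fuel stack visited, ∀ a ∈ visited, a ∈ flood g fuel stack visited := by
  intro fuel
  induction fuel with
  | zero => intro stack visited a ha; cases stack <;> exact ha
  | succ fuel ih =>
    intro stack visited a ha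
    cases stack with
    | nil => exact ha
    | cons p rest =>
      rw [flood_succ]
      apply ih
      refine List.foldlRecOn (nbrs p) (floodStep g)
        (motive := fun (st : List (Int × Int) × PySem.Set (Int × Int)) => a ∈ st.2) ha ?_
      intro b hb q _
      simp only [floodStep]
      rcases hv : valB g q.2 q.1 with _ | v
      · exact hb
      · dsimp only
        split_ifs with hg
        · exact (PySem.Set.mem_add _ _ _).mpr (Or.inl hb)
        · exact hb

theorem flood_nodup (g : List (List Int)) :
    ∀ fuel stack visited, List.Nodup visited → List.Nodup (flood g fuel stack visited) := by
  intro fuel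
  induction fuel with
  | zero => intro stack visited h; cases stack <;> exact h
  | succ fuel ih =>
    intro stack visited h
    cases stack with
    | nil => exact h
    | cons p rest =>
      rw [flood_succ]
      apply ih
      refine List.foldlRecOn (nbrs p) (floodStep g)
        (motive := fun (st : List (Int × Int) × PySem.Set (Int × Int)) => List.Nodup st.2) h ?_
      intro b hb q _
      simp only [floodStep]
      rcases hv : valB g q.2 q.1 with _ | v
      · exact hb
      · dsimp only
        split_ifs with hg
        · exact PySem.Set.nodup_add _ _ hb
        · exact hb

theorem flood_sound (g : List (List Int)) (s : Int × Int) :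
    ∀ fuel stack visited, (∀ p ∈ stack, Reach g s p) → (∀ a ∈ visited, Reach g s a) →
      ∀ a ∈ flood g fuel stack visited, Reach g s a := by
  intro fuel
  induction fuel with
  | zero => intro stack visited _ hvis a ha; cases stack <;> exact hvis a ha
  | succ fuel ih =>
    intro stack visited hst hvis a ha
    cases stack with
    | nil => exact hvis a ha
    | cons p rest =>
      rw [flood_succ] at ha
      have hinv : (∀ p' ∈ ((nbrs p).foldl (floodStep g) (rest, visited)).1, Reach g s p') ∧
          (∀ b ∈ ((nbrs p).foldl (floodStep g) (rest, visited)).2, Reach g s b) := by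
        refine List.foldlRecOn (nbrs p) (floodStep g)
          (motive := fun (st : List (Int × Int) × PySem.Set (Int × Int)) =>
            (∀ p' ∈ st.1, Reach g s p') ∧ (∀ b ∈ st.2, Reach g s b)) ?_ ?_
        · exact ⟨fun p' h => hst p' (List.mem_cons_of_mem _ h), hvis⟩
        · intro b hb q hq
          simp only [floodStep]
          rcases hv : valB g q.2 q.1 with _ | v
          · exact hb
          · dsimp only
            split_ifs with hg
            · have hedge : Edge g p q := ⟨hq, v, hv, hg.1⟩
              have hq' : Reach g s q := (hst p List.mem_cons_self).trans (Relation.ReflTransGen.single hedge)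
              refine ⟨?_, ?_⟩
              · intro p' hp'
                rcases List.mem_cons.mp hp' with rfl | h
                · exact hq'
                · exact hb.1 p' h
              · intro b' hb'
                rcases (PySem.Set.mem_add _ _ _).mp hb' with h | rfl
                · exact hb.2 b' h
                · exact hq'
            · exact hb
      exact ih _ _ hinv.1 hinv.2 a ha

theorem flood_closed (g : List (List Int)) :
    ∀ fuel stack visited,
      (∀ p ∈ stack, p ∈ visited) →
      (∀ a ∈ visited, a ∈ stack ∨ ∀ q, Edge g a q → q ∈ visited) →
      ((Vg g) \ visited.toFinset).card + stack.length ≤ fuel →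
      ∀ a ∈ flood g fuel stack visited, ∀ q, Edge g a q → q ∈ flood g fuel stack visited := by
  intro fuel
  induction fuel with
  | zero =>
    intro stack visited hsv hcl hcard a ha q he
    cases stack with
    | nil =>
      rcases hcl a ha with h | h
      · exact absurd h (List.not_mem_nil)
      · exact h q he
    | cons p rest => simp at hcard
  | succ fuel ih =>
    intro stack visited hsv hcl hcard a ha q he
    cases stack with
    | nil =>
      rcases hcl a ha with h | h
      · exact absurd h (List.not_mem_nil)
      · exact h q he
    | cons p rest =>
      rw [flood_succ] at ha ⊢
      -- facts about the neighbour fold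
      have inner : ∀ (l : List (Int × Int)) (st : List (Int × Int) × PySem.Set (Int × Int)),
          (∀ b ∈ st.1, b ∈ st.2) →
          (∀ b ∈ st.2, b ∈ (List.foldl (floodStep g) st l).2) ∧
          (∀ b ∈ st.1, b ∈ (List.foldl (floodStep g) st l).1) ∧
          (∀ b ∈ (List.foldl (floodStep g) st l).1, b ∈ (List.foldl (floodStep g) st l).2) ∧
          (∀ b ∈ (List.foldl (floodStep g) st l).2, b ∈ st.2 ∨ b ∈ (List.foldl (floodStep g) st l).1) ∧
          (∀ q' ∈ l, (∃ v, valB g q'.2 q'.1 = some v ∧ v ≠ 9) →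
            q' ∈ (List.foldl (floodStep g) st l).2) ∧
          ((Vg g \ (List.foldl (floodStep g) st l).2.toFinset).card +
              (List.foldl (floodStep g) st l).1.length ≤
            (Vg g \ st.2.toFinset).card + st.1.length) := by
        intro l
        induction l with
        | nil =>
          intro st h0
          exact ⟨fun b hb => hb, fun b hb => hb, h0, fun b hb => Or.inl hb, by simp, le_refl _⟩
        | cons q' l ihl =>
          intro st h0
          simp only [List.foldl_cons]
          rcases hv : valB g q'.2 q'.1 with _ | v
          · have hstep : floodStep g st q' = st := by simp [floodStep, hv]
            rw [hstep]
            obtain ⟨f1, f2, f3, f4, f5, f6⟩ := ihl st h0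
            refine ⟨f1, f2, f3, f4, ?_, f6⟩
            intro q2 hq2 hv2
            rcases List.mem_cons.mp hq2 with rfl | hmem
            · obtain ⟨v2, hv2', _⟩ := hv2
              rw [hv] at hv2'; exact absurd hv2' (by simp)
            · exact f5 q2 hmem hv2
          · by_cases hg : v ≠ 9 ∧ q' ∉ st.2
            · have hstep : floodStep g st q' = (q' :: st.1, PySem.Set.add st.2 q') := by
                simp only [floodStep, hv]; rw [if_pos hg]
              rw [hstep]
              have h0' : ∀ b ∈ q' :: st.1, b ∈ PySem.Set.add st.2 q' := by
                intro b hb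
                rcases List.mem_cons.mp hb with rfl | h
                · exact (PySem.Set.mem_add _ _ _).mpr (Or.inr rfl)
                · exact (PySem.Set.mem_add _ _ _).mpr (Or.inl (h0 b h))
              obtain ⟨f1, f2, f3, f4, f5, f6⟩ := ihl (q' :: st.1, PySem.Set.add st.2 q') h0'
              have hq'Vg : q' ∈ Vg g := (mem_Vg g q').mpr (by simpa using valB_some_valid g hv)
              have hq'mem : q' ∈ Vg g \ st.2.toFinset :=
                Finset.mem_sdiff.mpr ⟨hq'Vg, by simpa using hg.2⟩
              have herase : Vg g \ (PySem.Set.add st.2 q').toFinset = (Vg g \ st.2.toFinset).erase q' := by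
                rw [PySem.Set.add_of_not_mem hg.2, List.toFinset_append]
                ext b
                simp only [Finset.mem_sdiff, Finset.mem_erase, Finset.mem_union, List.mem_toFinset,
                  List.toFinset_cons, List.toFinset_nil, insert_empty_eq, Finset.mem_singleton]
                tauto
              have hcards : (Vg g \ (PySem.Set.add st.2 q').toFinset).card =
                  (Vg g \ st.2.toFinset).card - 1 := by
                rw [herase, Finset.card_erase_of_mem hq'mem]
              have hpos : 0 < (Vg g \ st.2.toFinset).card := Finset.card_pos.mpr ⟨q', hq'mem⟩
              refine ⟨?_, ?_, f3, ?_, ?_, ?_⟩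
              · intro b hb; exact f1 b ((PySem.Set.mem_add _ _ _).mpr (Or.inl hb))
              · intro b hb; exact f2 b (List.mem_cons_of_mem _ hb)
              · intro b hb
                rcases f4 b hb with h | h
                · rcases (PySem.Set.mem_add _ _ _).mp h with h' | rfl
                  · exact Or.inl h'
                  · exact Or.inr (f2 b List.mem_cons_self)
                · exact Or.inr h
              · intro q2 hq2 hv2
                rcases List.mem_cons.mp hq2 with rfl | hmem
                · exact f1 q2 ((PySem.Set.mem_add _ _ _).mpr (Or.inr rfl))
                · exact f5 q2 hmem hv2
              · simp only [List.length_cons] at f6 ⊢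
                omega
            · have hstep : floodStep g st q' = st := by
                simp only [floodStep, hv]; rw [if_neg hg]
              rw [hstep]
              obtain ⟨f1, f2, f3, f4, f5, f6⟩ := ihl st h0
              refine ⟨f1, f2, f3, f4, ?_, f6⟩
              intro q2 hq2 hv2
              rcases List.mem_cons.mp hq2 with rfl | hmem
              · obtain ⟨v2, hv2', h92⟩ := hv2
                rw [hv] at hv2'
                have : v2 = v := by injection hv2'.symm
                subst this
                have : q2 ∈ st.2 := by by_contra hq; exact hg ⟨h92, hq⟩
                exact f1 q2 this
              · exact f5 q2 hmem hv2
      obtain ⟨f1, f2, f3, f4, f5, f6⟩ := inner (nbrs p) (rest, visited)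
        (fun b hb => hsv b (List.mem_cons_of_mem _ hb))
      refine ih _ _ f3 ?_ ?_ a ha q he
      · intro b hb
        rcases f4 b hb with hbv | hbs
        · rcases hcl b hbv with hstk | hclosed
          · rcases List.mem_cons.mp hstk with rfl | hrest
            · exact Or.inr (fun q2 he2 => f5 q2 he2.1 he2.2)
            · exact Or.inl (f2 b hrest)
          · exact Or.inr (fun q2 he2 => f1 _ (hclosed q2 he2))
        · exact Or.inl hbs
      · dsimp only at f6
        simp only [List.length_cons] at hcard
        omega

theorem flood_iff (g : List (List Int)) (s a : Int × Int) :
    a ∈ flood g (cellCount g + 1) [s] (PySem.Set.add PySem.Set.empty s) ↔ Reach g s a := by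
  have hvis : PySem.Set.add (PySem.Set.empty : PySem.Set (Int × Int)) s = [s] := rfl
  constructor
  · intro h
    refine flood_sound g s _ _ _ ?_ ?_ a h
    · intro p hp
      rcases List.mem_cons.mp hp with rfl | h'
      · exact Relation.ReflTransGen.refl
      · exact absurd h' (List.not_mem_nil)
    · rw [hvis]
      intro b hb
      rcases List.mem_cons.mp hb with rfl | h'
      · exact Relation.ReflTransGen.refl
      · exact absurd h' (List.not_mem_nil)
  · intro hr
    have hcard : ((Vg g) \ (PySem.Set.add (PySem.Set.empty : PySem.Set (Int × Int)) s).toFinset).card +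
        ([s] : List (Int × Int)).length ≤ cellCount g + 1 := by
      rw [hvis]
      have h1 : (Vg g \ ([s] : List (Int × Int)).toFinset).card ≤ (Vg g).card :=
        Finset.card_le_card (Finset.sdiff_subset)
      have := card_Vg_le g
      simp only [List.length_cons, List.length_nil]
      omega
    have hsv : ∀ p ∈ ([s] : List (Int × Int)), p ∈ PySem.Set.add (PySem.Set.empty : PySem.Set (Int × Int)) s := by
      rw [hvis]; exact fun p hp => hp
    have hcl : ∀ b ∈ PySem.Set.add (PySem.Set.empty : PySem.Set (Int × Int)) s,
        b ∈ ([s] : List (Int × Int)) ∨ ∀ q, Edge g b q → q ∈ PySem.Set.add (PySem.Set.empty : PySem.Set (Int × Int)) s := by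
      rw [hvis]; exact fun b hb => Or.inl hb
    have hclosed := flood_closed g (cellCount g + 1) [s] _ hsv hcl hcard
    unfold Reach at hr
    induction hr with
    | refl => exact flood_mono g _ _ _ s (by rw [hvis]; exact List.mem_cons_self)
    | tail hab hbc ihh => exact hclosed _ ihh _ hbc

-- ---------- assembly ----------

theorem basin_size_eq (g : List (List Int)) (x y : Int) (h : Valid g (x, y)) :
    PySem.Set.len (findBasin g (cellCount g + 1) (x, y) PySem.Set.empty) = basinSizeB g y x := by
  have h1 : (findBasin g (cellCount g + 1) (x, y) PySem.Set.empty).Nodup :=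
    findBasin_nodup g _ _ _ List.nodup_nil
  have h2 : (flood g (cellCount g + 1) [(x, y)] (PySem.Set.add PySem.Set.empty (x, y))).Nodup :=
    flood_nodup g _ _ _ (by
      have : PySem.Set.add (PySem.Set.empty : PySem.Set (Int × Int)) (x, y) = [(x, y)] := rfl
      rw [this]; exact List.nodup_singleton _)
  have hperm := (List.perm_ext_iff_of_nodup h1 h2).mpr
    (fun a => (findBasin_iff g (x, y) h a).trans ((flood_iff g (x, y) a).symm))
  simp only [basinSizeB, PySem.Set.len, hperm.length_eq]

theorem lowLoop_eq (g : List (List Int)) (num : Int) :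
    ∀ l, lowLoopA g num l = l.all (fun q =>
      match valB g q.2 q.1 with
      | none => true
      | some v => decide (num < v)) := by
  intro l
  induction l with
  | nil => rfl
  | cons q l ih =>
    simp only [lowLoopA, List.all_cons]
    rw [tryValA_eq]
    rcases hv : valB g q.2 q.1 with _ | v
    · simpa using ih
    · dsimp only
      by_cases hlt : num < v
      · rw [if_neg (by simpa using hlt)]
        simp [hlt, ih]
      · rw [if_pos (by simpa using hlt)]
        simp [hlt]

theorem isLow_eq (g : List (List Int)) (num x y : Int) :
    lowLoopA g num (nbrs (x, y)) = isLowB g num x y := by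
  rw [lowLoop_eq]
  rfl

-- ===== VERDICT (by name: the statement is the Claim_ definition above) =====
theorem solve_spec : Claim_equal_solve := by
  intro input _ hpre
  unfold Spec_solve
  cases input with
  | nil => decide
  | cons r0 rest =>
    have hst : List.foldl (fun st y =>
        (PySem.List.pyRange 0 ((r0.length : Nat) : Int)).foldl (fun st x =>
          let num := PySem.List.pyGetD (PySem.List.pyGetD (r0 :: rest) y []) x 0
          if lowLoopA (r0 :: rest) num (nbrs (x, y)) then
            (st.1 ++ [num],
             st.2 ++ [PySem.Set.len (findBasin (r0 :: rest) (cellCount (r0 :: rest) + 1) (x, y) PySem.Set.empty)])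
          else st) st)
        (([], []) : List Int × List Int) (PySem.List.pyRange 0 (((r0 :: rest).length : Nat) : Int)) =
      List.foldl (fun st y =>
        (PySem.List.pyRange 0 ((r0.length : Nat) : Int)).foldl (fun st x =>
          let num := PySem.List.pyGetD (PySem.List.pyGetD (r0 :: rest) y []) x 0
          if isLowB (r0 :: rest) num x y then (st.1 ++ [num], st.2 ++ [basinSizeB (r0 :: rest) y x]) else st) st)
        (([], []) : List Int × List Int) (PySem.List.pyRange 0 (((r0 :: rest).length : Nat) : Int)) := by
      apply PySem.List.foldl_congr_mem
      intro acc y hy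
      apply PySem.List.foldl_congr_mem
      intro acc2 x hx
      rw [PySem.List.mem_pyRange_one] at hy hx
      have hvalid : Valid (r0 :: rest) (x, y) := by
        refine ⟨hx.1, hy.1, by exact_mod_cast hy.2, ?_⟩
        have hrow : (r0 :: rest).getD y.toNat [] ∈ (r0 :: rest) := by
          rw [getD_row _ _ (by simp at hy ⊢; omega)]
          exact List.getElem_mem _
        have hle := hpre _ hrow
        simp only [List.headD_cons] at hle
        have hx2 : x < (r0.length : Int) := hx.2
        simp only
        omega
      simp only
      rw [isLow_eq, basin_size_eq _ x y hvalid]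
    simp only [solve, solve_alt, List.headD_cons]
    rw [hst]
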